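-- pv_equiv track=rewrite | github.com/YanaHontarenko/GeekHub-homework | hw1/3.py | findMaxGist
-- ===== SOURCE A (Python) =====
-- def findMaxGist(gist):
--     result = []
--     for i in range(0, len(gist)):
--         result.append(gist[i])
--         for j in range(i + 1, len(gist)):
--             if gist[i] <= gist[j]:
--                 result[i] = result[i] + gist[i]
--             else:
--                 break
--     return result
-- ===== SOURCE B (Python) =====
-- def findMaxGist(gist):
--     n = len(gist)
--     cnt = [0] * n
--     for i in range(n - 1, -1, -1):
--         j = i + 1
--         while j < n and gist[j] >= gist[i]:
--             j += cnt[j] + 1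
--         cnt[i] = j - i - 1
--     return [gist[i] * (cnt[i] + 1) for i in range(n)]
-- ===== Notes on version B (the rewrite author's own statement) =====
-- stated objective: faster
-- what changed: Replaced A's per-index rescan of the following elements by a single right-to-left pass that builds a jump-pointer count table (cnt[i] = length of the run of elements >= gist[i] after i, computed by hopping over already-computed runs), then maps gist[i]*(cnt[i]+1).
import Mathlib
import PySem

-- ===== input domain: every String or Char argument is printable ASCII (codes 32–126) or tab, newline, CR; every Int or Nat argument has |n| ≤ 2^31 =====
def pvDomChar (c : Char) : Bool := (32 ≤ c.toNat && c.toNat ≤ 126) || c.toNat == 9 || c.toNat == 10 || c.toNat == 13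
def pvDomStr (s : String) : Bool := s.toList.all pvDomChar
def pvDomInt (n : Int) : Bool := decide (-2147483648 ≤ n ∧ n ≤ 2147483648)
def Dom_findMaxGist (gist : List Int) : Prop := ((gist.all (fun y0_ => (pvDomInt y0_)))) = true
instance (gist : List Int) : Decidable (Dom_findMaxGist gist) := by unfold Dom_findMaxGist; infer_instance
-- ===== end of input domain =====

-- B replaces A's quadratic per-index rescans by a right-to-left jump-pointer (next-smaller run) count table; objective: faster.

-- ===== PORT A =====
-- A's inner j-loop: starting from result[i] = gist[i], keep adding gist[i] while gist[i] <= gist[j], break otherwise.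
def findMaxGistInner (g : List Int) (x : Int) (acc : Int) (j : Nat) : Int :=
  if _ : j < g.length then
    if x ≤ g.getD j 0 then findMaxGistInner g x (acc + x) (j + 1) else acc
  else acc
termination_by g.length - j

def findMaxGist (gist : List Int) : List Int :=
  (List.range gist.length).foldl
    (fun result i => result ++ [findMaxGistInner gist (gist.getD i 0) (gist.getD i 0) (i + 1)]) []

-- ===== PORT B =====
-- B's inner while-loop: j += cnt[j] + 1 while j < n and gist[j] >= gist[i]; cnts holds cnt for indices i+1..n-1
-- (cnt[j] = cnts[j-i-1]); counts are nonnegative, so kept as Nat; fuel = n suffices since j strictly increases.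
def findMaxGistJump (g : List Int) (i : Nat) (x : Int) (cnts : List Nat) (j : Nat) : Nat → Nat
  | 0 => j
  | fuel + 1 =>
    if j < g.length ∧ x ≤ g.getD j 0 then
      findMaxGistJump g i x cnts (j + cnts.getD (j - i - 1) 0 + 1) fuel
    else j

-- the right-to-left loop over i = n-1 .. 0; buildCnts g k = [cnt[n-k], …, cnt[n-1]]
def findMaxGistCnts (g : List Int) : Nat → List Nat
  | 0 => []
  | k + 1 =>
    let i := g.length - (k + 1)
    let rest := findMaxGistCnts g k
    (findMaxGistJump g i (g.getD i 0) rest (i + 1) g.length - i - 1) :: rest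

def findMaxGist_alt (gist : List Int) : List Int :=
  let cnt := findMaxGistCnts gist gist.length
  (List.range gist.length).map (fun i => gist.getD i 0 * ((cnt.getD i 0 : Int) + 1))

-- ===== PRECONDITION & SPEC =====
def Spec_findMaxGist (gist : List Int) (out : List Int) : Prop := out = findMaxGist_alt gist
instance (gist : List Int) (out : List Int) : Decidable (Spec_findMaxGist gist out) := by unfold Spec_findMaxGist; infer_instance

-- ===== CLAIM (what is proved, stated in full; the proofs are below) =====
def Claim_equal_findMaxGist : Prop := ∀ (gist : List Int), Dom_findMaxGist gist → Spec_findMaxGist gist (findMaxGist gist)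

-- ===== LEMMAS AND PROOFS =====

-- length of the run of elements ≥ x in g starting at index j
def pvTwLen (g : List Int) (x : Int) (j : Nat) : Nat :=
  ((g.drop j).takeWhile (fun v => decide (x ≤ v))).length

-- the intended count for index i
def pvLc (g : List Int) (i : Nat) : Nat := pvTwLen g (g.getD i 0) (i + 1)

theorem pvTwLen_le (g : List Int) (x : Int) (j : Nat) : pvTwLen g x j ≤ g.length - j := by
  have := List.IsPrefix.length_le (List.takeWhile_prefix (l := g.drop j) (fun v => decide (x ≤ v)))
  simpa [pvTwLen] using this

theorem pvTw_elem (p : Int → Bool) (l : List Int) (k : Nat)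
    (hk : k < (l.takeWhile p).length) : p (l.getD k 0) = true := by
  have hpref : (l.takeWhile p) <+: l := List.takeWhile_prefix p
  have hlen : k < l.length := lt_of_lt_of_le hk (List.IsPrefix.length_le hpref)
  have : l[k] = (l.takeWhile p)[k] := (List.IsPrefix.getElem hpref hk).symm
  have hmem : (l.takeWhile p)[k] ∈ l.takeWhile p := List.getElem_mem hk
  have := List.mem_takeWhile_imp hmem
  simp [hlen, ‹l[k] = _›, this]

theorem pvTw_split (p : Int → Bool) (m : Nat) (l : List Int)
    (hm : m ≤ l.length) (hall : ∀ k, k < m → p (l.getD k 0) = true) :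
    (l.takeWhile p).length = m + ((l.drop m).takeWhile p).length := by
  induction m generalizing l with
  | zero => simp
  | succ m ih =>
    cases l with
    | nil => simp at hm
    | cons a t =>
      have ha : p a = true := by simpa using hall 0 (Nat.succ_pos m)
      have : (t.takeWhile p).length = m + ((t.drop m).takeWhile p).length := by
        refine ih t (by simpa using hm) ?_
        intro k hk
        simpa using hall (k + 1) (by omega)
      simp [ha, this]
      omega

theorem pvInner_eq (g : List Int) (x : Int) :
    ∀ d j acc, g.length - j ≤ d → findMaxGistInner g x acc j = acc + x * (pvTwLen g x j : Int) := by
  intro d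
  induction d with
  | zero =>
    intro j acc hd
    rw [findMaxGistInner, dif_neg (by omega)]
    have : g.drop j = [] := List.drop_eq_nil_of_le (by omega)
    simp [pvTwLen, this]
  | succ d ih =>
    intro j acc hd
    rw [findMaxGistInner]
    by_cases hj : j < g.length
    · have hdrop : g.drop j = g[j] :: g.drop (j + 1) := List.drop_eq_getElem_cons hj
      by_cases hx : x ≤ g.getD j 0
      · rw [dif_pos hj, if_pos hx]
        rw [ih (j + 1) (acc + x) (by omega)]
        have hxg : x ≤ g[j] := by simpa [List.getD_eq_getElem, hj] using hx
        have : pvTwLen g x j = pvTwLen g x (j + 1) + 1 := by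
          unfold pvTwLen
          rw [hdrop, List.takeWhile_cons, if_pos (by simpa using hxg)]
          simp
        rw [this]; push_cast; ring
      · rw [dif_pos hj, if_neg hx]
        have hxg : ¬ x ≤ g[j] := fun h => hx (by simpa [List.getD_eq_getElem, hj] using h)
        have : pvTwLen g x j = 0 := by
          unfold pvTwLen
          rw [hdrop, List.takeWhile_cons, if_neg (by simpa using hxg)]
          simp
        simp [this]
    · rw [dif_neg hj]
      have : g.drop j = [] := List.drop_eq_nil_of_le (by omega)
      simp [pvTwLen, this]

theorem pvJump_eq (g : List Int) (i : Nat) (x : Int) (cnts : List Nat)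
    (hlen : cnts.length = g.length - (i + 1))
    (hc : ∀ m, m < cnts.length → cnts.getD m 0 = pvLc g (i + 1 + m)) :
    ∀ fuel j, i < j → g.length - j ≤ fuel →
      findMaxGistJump g i x cnts j fuel = j + pvTwLen g x j := by
  intro fuel
  induction fuel with
  | zero =>
    intro j hij hd
    have : g.drop j = [] := List.drop_eq_nil_of_le (by omega)
    simp [findMaxGistJump, pvTwLen, this]
  | succ fuel ih =>
    intro j hij hd
    rw [findMaxGistJump]
    by_cases h : j < g.length ∧ x ≤ g.getD j 0
    · obtain ⟨hj, hx⟩ := h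
      rw [if_pos ⟨hj, hx⟩]
      have hdrop : g.drop j = g[j] :: g.drop (j + 1) := List.drop_eq_getElem_cons hj
      have hxg : x ≤ g[j] := by simpa [List.getD_eq_getElem, hj] using hx
      -- the stored count at j is the run length starting at j+1 for threshold g[j]
      have hm : j - i - 1 < cnts.length := by omega
      have hcj : cnts.getD (j - i - 1) 0 = pvTwLen g g[j] (j + 1) := by
        have := hc (j - i - 1) hm
        have he : i + 1 + (j - i - 1) = j := by omega
        rw [he] at this
        simpa [pvLc, List.getD_eq_getElem, hj] using this
      set c := cnts.getD (j - i - 1) 0 with hcdef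
      have hcle : c ≤ g.length - (j + 1) := hcj ▸ pvTwLen_le g g[j] (j + 1)
      rw [ih (j + c + 1) (by omega) (by omega)]
      -- split the run at j into its first c+1 elements (all ≥ x) and the rest
      have hsplit : pvTwLen g x j = (c + 1) + pvTwLen g x (j + c + 1) := by
        unfold pvTwLen
        have hall : ∀ k, k < c + 1 → (decide (x ≤ (g.drop j).getD k 0)) = true := by
          intro k hk
          cases k with
          | zero =>
            rw [hdrop, List.getD_cons_zero]
            exact decide_eq_true hxg
          | succ k =>
            have hk' : k < ((g.drop (j + 1)).takeWhile (fun v => decide (g[j] ≤ v))).length := by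
              have : c = pvTwLen g g[j] (j + 1) := hcj
              unfold pvTwLen at this
              omega
            have := pvTw_elem (fun v => decide (g[j] ≤ v)) (g.drop (j + 1)) k hk'
            have hle : g[j] ≤ (g.drop (j + 1)).getD k 0 := by simpa using this
            rw [hdrop, List.getD_cons_succ]
            exact decide_eq_true (le_trans hxg hle)
        have hmle : c + 1 ≤ (g.drop j).length := by simp; omega
        rw [pvTw_split (fun v => decide (x ≤ v)) (c + 1) (g.drop j) hmle hall]
        rw [List.drop_drop]
        have he : j + (c + 1) = j + c + 1 := by omega
        rw [he]
      rw [hsplit]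
      omega
    · rw [if_neg h]
      by_cases hj : j < g.length
      · have hx : ¬ x ≤ g.getD j 0 := fun hx => h ⟨hj, hx⟩
        have hdrop : g.drop j = g[j] :: g.drop (j + 1) := List.drop_eq_getElem_cons hj
        have hxg : ¬ x ≤ g[j] := fun hle => hx (by simpa [List.getD_eq_getElem, hj] using hle)
        have : pvTwLen g x j = 0 := by
          unfold pvTwLen
          rw [hdrop, List.takeWhile_cons, if_neg (by simpa using hxg)]
          simp
        simp [this]
      · have : g.drop j = [] := List.drop_eq_nil_of_le (by omega)
        simp [pvTwLen, this]

theorem pvCnts_spec (g : List Int) :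
    ∀ k, k ≤ g.length →
      (findMaxGistCnts g k).length = k ∧
      ∀ m, m < k → (findMaxGistCnts g k).getD m 0 = pvLc g (g.length - k + m) := by
  intro k
  induction k with
  | zero => intro _; simp [findMaxGistCnts]
  | succ k ih =>
    intro hk
    obtain ⟨hl, hr⟩ := ih (by omega)
    rw [findMaxGistCnts]
    set i := g.length - (k + 1) with hidef
    have hi1 : i + 1 = g.length - k := by omega
    have hJ : findMaxGistJump g i (g.getD i 0) (findMaxGistCnts g k) (i + 1) g.length
        = (i + 1) + pvTwLen g (g.getD i 0) (i + 1) := by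
      apply pvJump_eq g i (g.getD i 0) (findMaxGistCnts g k) (by omega) _ g.length (i + 1)
        (by omega) (by omega)
      intro m hm
      rw [hl] at hm
      have := hr m hm
      have he : g.length - k + m = i + 1 + m := by omega
      rw [he] at this
      exact this
    constructor
    · simp [hl]
    · intro m hm
      cases m with
      | zero =>
        simp only [Nat.add_zero, List.getD_cons_zero, hJ, pvLc]
        omega
      | succ m =>
        simp only [List.getD_cons_succ]
        have := hr m (by omega)
        have he : g.length - k + m = g.length - (k + 1) + (m + 1) := by omega
        rw [he] at this
        exact this

theorem pvA_eq_map (g : List Int) :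
    findMaxGist g = (List.range g.length).map (fun i => g.getD i 0 * ((pvLc g i : Int) + 1)) := by
  unfold findMaxGist
  rw [PySem.List.foldl_append_singleton_eq_map]
  rw [List.nil_append]
  apply List.map_congr_left
  intro i hi
  rw [pvInner_eq g (g.getD i 0) g.length (i + 1) (g.getD i 0) (by omega)]
  unfold pvLc
  ring

-- ===== VERDICT (by name: the statement is the Claim_ definition above) =====
theorem findMaxGist_spec : Claim_equal_findMaxGist := by
  intro g _
  show findMaxGist g = findMaxGist_alt g
  rw [pvA_eq_map]
  have hs := pvCnts_spec g g.length (le_refl _)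
  unfold findMaxGist_alt
  apply List.map_congr_left
  intro i hi
  have hi' : i < g.length := List.mem_range.mp hi
  have := hs.2 i hi'
  simp only [Nat.sub_self, Nat.zero_add] at this
  rw [this]
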